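-- pv_equiv track=rewrite | github.com/ethanengel6/Scripts---Python-1 | Python Scripts/HW4.py | commonElems
-- ===== SOURCE A (Python) =====
-- def commonElems(firstlist,secondlist):
--     """First identifies the longer of 2 lists.  Then goes through the lists looking for common elements, checking against each item in the longer list.  If there are any duplicates, they are deleted out"""
--     commonElemList=[]
--     if len(firstlist)>len(secondlist):
--         for q in range(len(firstlist)):
--             if firstlist[q] in secondlist:
--                 commonElemList.append(firstlist[q])
--     elif len(secondlist)>=len(firstlist):
--         for q in range(len(secondlist)):
--             if secondlist[q] in firstlist:
--                 commonElemList.append(secondlist[q])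
--     z=0
--     for x in range(len(commonElemList)):
--         if commonElemList.count(commonElemList[z])>1:
--             del commonElemList[z]
--         else:
--             z+=1
--     return(commonElemList)
-- ===== SOURCE B (Python) =====
-- def commonElems(firstlist, secondlist):
--     """Single reverse pass: walk the longer list (second on ties) back-to-front,
--     appending each element common to the other list once, then reverse.
--     Keeps the last occurrence of each common value, in that list's order."""
--     if len(firstlist) > len(secondlist):
--         base, other = firstlist, secondlist
--     else:
--         base, other = secondlist, firstlist
--     result = []
--     for x in reversed(base):
--         if x in other and x not in result:
--             result.append(x)
--     result.reverse()
--     return result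
-- ===== Notes on version B (the rewrite author's own statement) =====
-- stated objective: simpler
-- what changed: Replaces A's two phases (collect all common elements, then a count-and-delete dedup loop with a moving index) by one reverse pass over the longer list that appends each common element at most once, then reverses.
import Mathlib
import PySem

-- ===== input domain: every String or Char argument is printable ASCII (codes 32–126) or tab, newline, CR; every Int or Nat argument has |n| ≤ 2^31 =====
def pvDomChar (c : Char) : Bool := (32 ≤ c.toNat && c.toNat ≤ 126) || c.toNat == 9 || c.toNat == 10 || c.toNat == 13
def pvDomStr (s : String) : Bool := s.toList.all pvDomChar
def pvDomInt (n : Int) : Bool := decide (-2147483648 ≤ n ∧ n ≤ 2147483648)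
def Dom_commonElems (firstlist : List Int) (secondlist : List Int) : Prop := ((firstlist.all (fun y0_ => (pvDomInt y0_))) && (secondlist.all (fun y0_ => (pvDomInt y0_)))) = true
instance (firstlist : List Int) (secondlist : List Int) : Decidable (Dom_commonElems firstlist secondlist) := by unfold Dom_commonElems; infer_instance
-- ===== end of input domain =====

-- B replaces A's two phases (collect common elements, then count-and-delete dedup with a
-- moving index) by one reverse pass appending each common element once; objective: simpler.

-- ===== PORT A =====
-- body of A's second loop: if commonElemList.count(commonElemList[z])>1: del commonElemList[z] else: z+=1
def stepA (st : List Int × Int) : List Int × Int :=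
  if PySem.List.count st.1 (PySem.List.pyGetD st.1 st.2 0) > 1 then
    match PySem.List.pop? st.1 st.2 with   -- del st.1[z] (index always in range here)
    | some r => (r.2, st.2)
    | none => st
  else (st.1, st.2 + 1)

def commonElems (firstlist : List Int) (secondlist : List Int) : List Int :=
  let commonElemList : List Int :=
    if firstlist.length > secondlist.length then
      (PySem.List.pyRange 0 (firstlist.length : Int) 1).foldl
        (fun acc q => if PySem.List.pyGetD firstlist q 0 ∈ secondlist then
            acc ++ [PySem.List.pyGetD firstlist q 0] else acc) []
    else if secondlist.length ≥ firstlist.length then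
      (PySem.List.pyRange 0 (secondlist.length : Int) 1).foldl
        (fun acc q => if PySem.List.pyGetD secondlist q 0 ∈ firstlist then
            acc ++ [PySem.List.pyGetD secondlist q 0] else acc) []
    else []
  let final := (PySem.List.pyRange 0 (commonElemList.length : Int) 1).foldl
    (fun st _ => stepA st) (commonElemList, (0 : Int))
  final.1

-- ===== PORT B =====
def commonElems_alt (firstlist : List Int) (secondlist : List Int) : List Int :=
  let p := if firstlist.length > secondlist.length then (firstlist, secondlist)
           else (secondlist, firstlist)
  let result := p.1.reverse.foldl
    (fun acc x => if x ∈ p.2 ∧ x ∉ acc then acc ++ [x] else acc) []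
  result.reverse

-- ===== PRECONDITION & SPEC =====
def Spec_commonElems (firstlist : List Int) (secondlist : List Int) (out : List Int) : Prop := out = commonElems_alt firstlist secondlist
instance (firstlist : List Int) (secondlist : List Int) (out : List Int) : Decidable (Spec_commonElems firstlist secondlist out) := by unfold Spec_commonElems; infer_instance

-- ===== CLAIM (what is proved, stated in full; the proofs are below) =====
def Claim_equal_commonElems : Prop := ∀ (firstlist : List Int) (secondlist : List Int), Dom_commonElems firstlist secondlist → Spec_commonElems firstlist secondlist (commonElems firstlist secondlist)

-- ===== LEMMAS AND PROOFS =====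

-- a fold that ignores the list elements is function iteration
theorem foldl_const_iterate {α β : Type} (f : α → α) (l : List β) (init : α) :
    l.foldl (fun st _ => f st) init = f^[l.length] init := by
  induction l generalizing init with
  | nil => rfl
  | cons a t ih => simp [List.foldl_cons, ih, Function.iterate_succ_apply]

-- A's delete loop: with a prefix of already-unique elements, the remaining fuel turns the
-- suffix into its last-occurrence dedup (Mathlib's List.dedup).
theorem stepA_iterate (n : Nat) : ∀ (l : List Int) (z : Nat),
    l.length = z + n →
    (∀ x ∈ l.take z, List.count x l = 1) →
    (stepA^[n] (l, (z : Int))).1 = l.take z ++ (l.drop z).dedup := by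
  induction n with
  | zero =>
      intro l z hlen _
      have h1 : l.take z = l := List.take_of_length_le (by omega)
      have h2 : l.drop z = [] := List.drop_eq_nil_of_le (by omega)
      simp [h1, h2]
  | succ n ih =>
      intro l z hlen hpre
      have hz : z < l.length := by omega
      have hdrop : l.drop z = l[z] :: l.drop (z + 1) := List.drop_eq_getElem_cons hz
      have hsplit : ∀ y : Int, List.count y l = List.count y (l.take z) + List.count y (l.drop z) := by
        intro y
        conv_lhs => rw [← List.take_append_drop z l]
        rw [List.count_append]
      have hcl := hsplit l[z]
      have hxtake : l[z] ∉ l.take z := by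
        intro hmem
        have h1 := hpre _ hmem
        have h2 : 0 < List.count l[z] (l.take z) := List.count_pos_iff.mpr hmem
        have h3 : 0 < List.count l[z] (l.drop z) := by
          rw [hdrop]
          exact List.count_pos_iff.mpr (by first
            | exact List.mem_cons_self _ _
            | exact List.mem_cons_self)
        omega
      have hcount0 : List.count l[z] (l.take z) = 0 := List.count_eq_zero.mpr hxtake
      have hcountl : List.count l[z] l = 1 + List.count l[z] (l.drop (z + 1)) := by
        rw [hcl, hcount0, hdrop, List.count_cons_self]; omega
      have hget : PySem.List.pyGetD l (z : Int) 0 = l[z] := by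
        rw [PySem.List.pyGetD_natCast]
        exact List.getD_eq_getElem l 0 hz
      rw [Function.iterate_succ_apply]
      by_cases hmem : l[z] ∈ l.drop (z + 1)
      · -- duplicate: delete position z
        have hc : List.count l[z] l > 1 := by
          rw [hcountl]
          have := List.count_pos_iff.mpr hmem
          omega
        have hstep : stepA (l, (z : Int)) = (l.eraseIdx z, (z : Int)) := by
          simp only [stepA, hget, PySem.List.count_eq]
          rw [if_pos hc, PySem.List.pop?_natCast l z hz]
        rw [hstep]
        have herase : l.eraseIdx z = l.take z ++ l.drop (z + 1) := List.eraseIdx_eq_take_drop_succ l z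
        have htklen : (l.take z).length = z := by simp; omega
        have htake' : (l.eraseIdx z).take z = l.take z := by
          rw [herase, List.take_append_of_le_length (by omega), List.take_of_length_le (by omega)]
        have hdrop' : (l.eraseIdx z).drop z = l.drop (z + 1) := by
          rw [herase, List.drop_append_of_le_length (by omega), List.drop_eq_nil_of_le (by omega)]
          simp
        have hpre' : ∀ y ∈ (l.eraseIdx z).take z, List.count y (l.eraseIdx z) = 1 := by
          intro y hy
          rw [htake'] at hy
          have hyx : y ≠ l[z] := fun he => hxtake (he ▸ hy)
          have h1 := hpre y hy
          have hcy := hsplit y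
          rw [hdrop] at hcy
          simp only [List.count_cons] at hcy
          rw [if_neg (by simp only [beq_iff_eq]; exact Ne.symm hyx)] at hcy
          rw [herase, List.count_append]
          omega
        have hlen' : (l.eraseIdx z).length = z + n := by
          rw [herase]; simp; omega
        rw [ih (l.eraseIdx z) z hlen' hpre', htake', hdrop', hdrop,
          List.dedup_cons_of_mem hmem]
      · -- unique: advance z
        have hc1 : List.count l[z] (l.drop (z + 1)) = 0 := List.count_eq_zero.mpr hmem
        have hcnot : ¬ List.count l[z] l > 1 := by
          rw [hcountl, hc1]
          omega
        have hstep : stepA (l, (z : Int)) = (l, (z : Int) + 1) := by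
          simp only [stepA, hget, PySem.List.count_eq]
          rw [if_neg hcnot]
        have hcast : ((z : Int) + 1) = (((z + 1 : Nat)) : Int) := by push_cast; ring
        have htk : l.take (z + 1) = l.take z ++ [l[z]] := by
          rw [List.take_add_one, List.getElem?_eq_getElem hz]
          rfl
        have hpre' : ∀ y ∈ l.take (z + 1), List.count y l = 1 := by
          intro y hy
          rw [htk, List.mem_append, List.mem_singleton] at hy
          rcases hy with hy | hy
          · exact hpre y hy
          · rw [hy, hcountl, hc1]
        rw [hstep, hcast, ih l (z + 1) (by omega) hpre', htk, hdrop,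
          List.dedup_cons_of_notMem hmem, List.append_assoc, List.singleton_append]

-- B's pass with both tests equals a filter followed by the keep-first pass
theorem foldl_filter_mem (other : List Int) : ∀ (l acc : List Int),
    l.foldl (fun acc x => if x ∈ other ∧ x ∉ acc then acc ++ [x] else acc) acc
      = (l.filter (fun x => decide (x ∈ other))).foldl
          (fun acc x => if x ∉ acc then acc ++ [x] else acc) acc := by
  intro l
  induction l with
  | nil => intro acc; rfl
  | cons a t ih =>
      intro acc
      by_cases h : a ∈ other <;> simp [h, ih]

-- the keep-first pass is PySem's first-occurrence dedup
theorem foldl_keep_first (l : List Int) :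
    l.foldl (fun acc x => if x ∉ acc then acc ++ [x] else acc) []
      = PySem.List.dedup l := by
  have hf : (fun (acc : List Int) (x : Int) => if x ∉ acc then acc ++ [x] else acc)
      = PySem.Set.add := by
    funext acc x
    by_cases h : x ∈ acc <;> simp [PySem.Set.add, h]
  rw [hf, ← PySem.Set.ofList_eq_foldl]
  simp

theorem pydedup_append_singleton (l : List Int) (a : Int) :
    PySem.List.dedup (l ++ [a]) = PySem.List.dedup l ++ if a ∈ l then [] else [a] := by
  by_cases h : a ∈ l <;> simp [pysem, PySem.Set.add, h]

-- reversed first-occurrence dedup of the reversed list = last-occurrence dedup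
theorem pydedup_reverse (l : List Int) :
    (PySem.List.dedup l.reverse).reverse = l.dedup := by
  induction l with
  | nil => rfl
  | cons a t ih =>
      rw [List.reverse_cons, pydedup_append_singleton]
      simp only [PySem.List.dedup_eq_ofList] at ih ⊢
      by_cases h : a ∈ t
      · rw [List.dedup_cons_of_mem h]
        simp [h, ih]
      · rw [List.dedup_cons_of_notMem h]
        simp [h, ih]

-- each program on a chosen (base, other) pair
theorem commonElems_core (base other : List Int) :
    (stepA^[(base.filter (fun x => decide (x ∈ other))).length]
      ((base.filter (fun x => decide (x ∈ other))), (0 : Int))).1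
      = (base.filter (fun x => decide (x ∈ other))).dedup := by
  have h := stepA_iterate (base.filter (fun x => decide (x ∈ other))).length
    (base.filter (fun x => decide (x ∈ other))) 0 (by omega) (by simp)
  simpa using h

-- one branch of each program, on the chosen (base, other) pair
theorem commonElems_branch (base other : List Int) :
    ((PySem.List.pyRange 0 ((((PySem.List.pyRange 0 (base.length : Int) 1).foldl
        (fun acc q => if PySem.List.pyGetD base q 0 ∈ other then
          acc ++ [PySem.List.pyGetD base q 0] else acc) []).length : Int)) 1).foldl
      (fun st _ => stepA st)
      ((PySem.List.pyRange 0 (base.length : Int) 1).foldl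
        (fun acc q => if PySem.List.pyGetD base q 0 ∈ other then
          acc ++ [PySem.List.pyGetD base q 0] else acc) [], (0 : Int))).1
    = (base.reverse.foldl
        (fun acc x => if x ∈ other ∧ x ∉ acc then acc ++ [x] else acc) []).reverse := by
  have h1 : (PySem.List.pyRange 0 (base.length : Int) 1).foldl
      (fun acc q => if PySem.List.pyGetD base q 0 ∈ other then
        acc ++ [PySem.List.pyGetD base q 0] else acc) []
      = base.filter (fun v => decide (v ∈ other)) := by
    rw [PySem.List.foldl_pyRange_zero_pyGetD' base 0
      (fun acc v => if v ∈ other then acc ++ [v] else acc) []]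
    have e : (fun (acc : List Int) (v : Int) => if v ∈ other then acc ++ [v] else acc)
        = (fun (acc : List Int) (v : Int) =>
            if (fun x : Int => decide (x ∈ other)) v = true then acc ++ [id v] else acc) := by
      funext acc v
      simp
    rw [e, PySem.List.foldl_append_if]
    simp
  rw [h1, foldl_const_iterate]
  have hlenr : (PySem.List.pyRange 0
      (((base.filter (fun v => decide (v ∈ other))).length : Int)) 1).length
      = (base.filter (fun v => decide (v ∈ other))).length := by
    simp [PySem.List.length_pyRange_one]
  rw [hlenr, commonElems_core, foldl_filter_mem, foldl_keep_first,
    List.filter_reverse, pydedup_reverse]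

-- ===== VERDICT (by name: the statement is the Claim_ definition above) =====
theorem commonElems_spec : Claim_equal_commonElems := by
  intro firstlist secondlist _
  unfold Spec_commonElems commonElems commonElems_alt
  by_cases h : firstlist.length > secondlist.length
  · simp only [if_pos h]
    exact commonElems_branch firstlist secondlist
  · simp only [if_neg h, if_pos (show secondlist.length ≥ firstlist.length by omega)]
    exact commonElems_branch secondlist firstlist
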